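-- pv_equiv track=rewrite | github.com/kvas-it/pwf | pwf/router.py | match_path
-- ===== SOURCE A (Python) =====
-- def match_path(pattern, path):
--     """Match path with pattern and extract parameters if any.
--
--     :param tuple pattern: pattern for matching the path,
--     :param list path: parts of the path,
--     :return: dictionary with extracted parameters or ``None`` if there was no
--         match.
--     """
--     if len(pattern) != len(path):
--         return None
--     if len(path) == 0:
--         return {}
--     if pattern[0].startswith('$'):
--         ret = match_path(pattern[1:], path[1:])
--         if ret is None:
--             return None
--         else:
--             param_name = pattern[0][1:]
--             ret[param_name] = path[0]
--             return ret
--     if pattern[0] == path[0]: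
--         return match_path(pattern[1:], path[1:])
-- ===== SOURCE B (Python) =====
-- def match_path(pattern, path):
--     """Match path with pattern and extract parameters if any.
--
--     Single reverse linear pass over zipped parts (no slicing, no recursion).
--     """
--     if len(pattern) != len(path):
--         return None
--     params = {}
--     for pat, part in zip(reversed(pattern), reversed(path)):
--         if pat.startswith('$'):
--             params[pat[1:]] = part
--         elif pat != part:
--             return None
--     return params
-- ===== Notes on version B (the rewrite author's own statement) =====
-- stated objective: faster
-- what changed: Replaces the O(n^2) recursion with tuple slicing by a single linear loop over the zipped reversed sequences, assigning $-params into one dict and returning None early on a literal mismatch.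
import Mathlib
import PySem

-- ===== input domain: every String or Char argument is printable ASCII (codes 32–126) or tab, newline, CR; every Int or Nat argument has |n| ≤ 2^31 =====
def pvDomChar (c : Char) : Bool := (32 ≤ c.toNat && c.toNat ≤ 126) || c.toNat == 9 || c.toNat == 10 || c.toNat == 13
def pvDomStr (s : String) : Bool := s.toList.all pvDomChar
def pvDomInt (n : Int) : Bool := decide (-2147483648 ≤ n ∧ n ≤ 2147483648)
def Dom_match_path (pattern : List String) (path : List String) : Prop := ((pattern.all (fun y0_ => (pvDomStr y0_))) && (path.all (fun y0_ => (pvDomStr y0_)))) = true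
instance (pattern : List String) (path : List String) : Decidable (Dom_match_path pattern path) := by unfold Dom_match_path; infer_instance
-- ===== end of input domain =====

-- B replaces A's O(n^2) slicing recursion by one linear reverse pass over the zipped lists (objective: faster).


-- ===== PORT A =====
-- A's recursion, on the dict; pattern[1:]/path[1:] are the structural tails.
def matchPathDictA : List String → List String → Option (PySem.Dict String String)
  | pattern, path =>
    if pattern.length ≠ path.length then none
    else match pattern, path with
    | [], _ => some PySem.Dict.empty
    | p0 :: ps, x0 :: xs =>
      if PySem.Str.startswith p0 "$" then
        match matchPathDictA ps xs with
        | none => none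
        | some ret => some (ret.insert (PySem.Str.slice p0 (some 1) none) x0)
      else if p0 = x0 then matchPathDictA ps xs
      else none
    | _ :: _, [] => none

def match_path (pattern : List String) (path : List String) : Option (List (String × String)) :=
  (matchPathDictA pattern path).map PySem.Dict.items

-- ===== PORT B =====
-- B's loop body over the zipped reversed lists, with early None on mismatch.
def matchPathGoB : List (String × String) → PySem.Dict String String → Option (PySem.Dict String String)
  | [], params => some params
  | (pat, part) :: rest, params =>
    if PySem.Str.startswith pat "$" then
      matchPathGoB rest (params.insert (PySem.Str.slice pat (some 1) none) part)
    else if pat ≠ part then none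
    else matchPathGoB rest params

def match_path_alt (pattern : List String) (path : List String) : Option (List (String × String)) :=
  if pattern.length ≠ path.length then none
  else (matchPathGoB (List.zip pattern.reverse path.reverse) PySem.Dict.empty).map PySem.Dict.items

-- ===== PRECONDITION & SPEC =====
def Spec_match_path (pattern : List String) (path : List String) (out : Option (List (String × String))) : Prop := out = match_path_alt pattern path
instance (pattern : List String) (path : List String) (out : Option (List (String × String))) : Decidable (Spec_match_path pattern path out) := by unfold Spec_match_path; infer_instance

-- ===== CLAIM (what is proved, stated in full; the proofs are below) =====
def Claim_equal_match_path : Prop := ∀ (pattern : List String) (path : List String), Dom_match_path pattern path → Spec_match_path pattern path (match_path pattern path)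

-- ===== LEMMAS AND PROOFS =====

theorem matchPathGoB_append (l1 l2 : List (String × String)) (d : PySem.Dict String String) :
    matchPathGoB (l1 ++ l2) d =
      match matchPathGoB l1 d with
      | none => none
      | some d' => matchPathGoB l2 d' := by
  induction l1 generalizing d with
  | nil => simp [matchPathGoB]
  | cons hd tl ih =>
    obtain ⟨pat, part⟩ := hd
    simp only [List.cons_append, matchPathGoB]
    split_ifs with h1 h2
    · exact ih _
    · rfl
    · exact ih _

theorem matchPathDict_eq (pattern path : List String) (h : pattern.length = path.length) :
    matchPathDictA pattern path =
      matchPathGoB (List.zip pattern.reverse path.reverse) PySem.Dict.empty := by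
  induction pattern generalizing path with
  | nil =>
    cases path with
    | nil => simp [matchPathDictA, matchPathGoB]
    | cons x xs => simp at h
  | cons p0 ps ih =>
    cases path with
    | nil => simp at h
    | cons x0 xs =>
      have hlen : ps.length = xs.length := by simpa using h
      have hzip : List.zip (p0 :: ps).reverse (x0 :: xs).reverse
          = List.zip ps.reverse xs.reverse ++ [(p0, x0)] := by
        simp only [List.reverse_cons]
        rw [List.zip_append (by simp [hlen])]
        rfl
      rw [hzip, matchPathGoB_append, ← ih xs hlen]
      conv_lhs => rw [matchPathDictA]
      rw [if_neg (by simp [hlen])]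
      cases hrec : matchPathDictA ps xs with
      | none =>
        by_cases hs : PySem.Str.startswith p0 "$"
        · simp
        · by_cases he : p0 = x0 <;> simp [he]
      | some ret =>
        by_cases hs : PySem.Str.startswith p0 "$"
        · simp [matchPathGoB]
        · by_cases he : p0 = x0 <;> simp [he, matchPathGoB]

-- ===== VERDICT (by name: the statement is the Claim_ definition above) =====
theorem match_path_spec : Claim_equal_match_path := by
  intro pattern path _
  unfold Spec_match_path match_path match_path_alt
  by_cases h : pattern.length = path.length
  · rw [matchPathDict_eq pattern path h]
    simp [h]
  · have : matchPathDictA pattern path = none := by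
      unfold matchPathDictA; simp [h]
    simp [h, this]
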